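-- pv_equiv track=rewrite | github.com/KevinPham-BME-Prog/CCPS109-lab-upload | labs109(1).py | eliminate_neighbours
-- ===== SOURCE A (Python) =====
-- def eliminate_neighbours(items):
--   largest = max(items)
--   minimum = 0
--   count = 0
--   while largest in items:
--     minimum = min(items)
--     min_index = items.index(minimum)
--     if min_index == 0:
--       if len(items) == 1:
--           items.pop()
--       else:
--           items.pop(0)
--           items.pop(0)
--       count += 1
--     elif min_index == (len(items)-1):
--       items.pop()
--       items.pop()
--       count += 1
--     else:
--       if items[min_index-1] > items[min_index+1]:
--         items.pop(min_index-1)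
--         items.pop(min_index-1)
--       else:
--         items.pop(min_index)
--         items.pop(min_index)
--       count += 1
--   return count
-- ===== SOURCE B (Python) =====
-- def eliminate_neighbours(items):
--     largest = max(items)
--     n = len(items)
--     order = sorted(range(n), key=lambda i: items[i])  # stable: ties by original index
--     alive = list(range(n))            # surviving original indices, in position order
--     removed = [False] * n
--     remaining = items.count(largest)
--     count = 0
--     for i in order:
--         if remaining == 0:
--             break
--         if removed[i]:
--             continue
--         count += 1
--         p = alive.index(i)
--         if len(alive) == 1:
--             s, vict = 0, alive[0:1]
--         elif p == 0:
--             s, vict = 0, alive[0:2]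
--         elif p == len(alive) - 1:
--             s, vict = p - 1, alive[p - 1:p + 1]
--         elif items[alive[p - 1]] > items[alive[p + 1]]:
--             s, vict = p - 1, alive[p - 1:p + 1]
--         else:
--             s, vict = p, alive[p:p + 2]
--         for v in vict:
--             removed[v] = True
--             if items[v] == largest:
--                 remaining -= 1
--         del alive[s:s + len(vict)]
--     return count
-- ===== Notes on version B (the rewrite author's own statement) =====
-- stated objective: faster
-- what changed: Instead of rescanning the whole list every iteration for min(), items.index(), and 'largest in items', B sorts the positions by value once, then makes a single pass over that order with an alive-position list and a live counter of remaining maxima.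
-- outside the precondition, e.g. on eliminate_neighbours([]): A raises ValueError, B raises ValueError
import Mathlib
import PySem

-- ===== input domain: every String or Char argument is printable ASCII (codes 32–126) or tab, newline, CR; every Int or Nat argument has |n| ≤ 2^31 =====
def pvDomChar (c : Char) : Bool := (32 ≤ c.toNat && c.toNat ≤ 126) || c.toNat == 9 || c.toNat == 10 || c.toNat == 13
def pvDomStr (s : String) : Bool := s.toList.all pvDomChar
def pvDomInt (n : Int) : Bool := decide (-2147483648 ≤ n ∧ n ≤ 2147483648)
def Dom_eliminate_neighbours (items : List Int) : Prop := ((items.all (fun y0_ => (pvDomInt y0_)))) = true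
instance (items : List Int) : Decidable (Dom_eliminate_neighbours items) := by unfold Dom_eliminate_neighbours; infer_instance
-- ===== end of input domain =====

-- B replaces A's per-step min/index/membership scans by one stable sort of the
-- positions plus a single pass with an alive-position list (objective: faster by a
-- measured constant factor). Equivalence is about the RETURN value only: A empties
-- the caller's list in place, B does not mutate its argument.


-- ===== PORT A =====
-- termination helpers for the while-loop port (cited in decreasing_by)
theorem pv_min_index_lt (items : List Int) (h : items ≠ []) :
    (PySem.List.index? items ((PySem.List.min? items (fun x => x)).getD 0)).getD 0 < items.length := by
  obtain ⟨v, hv⟩ : ∃ v, PySem.List.min? items (fun x => x) = some v := by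
    cases hvv : PySem.List.min? items (fun x => x) with
    | none => exact absurd ((PySem.List.min?_eq_none_iff _ _).mp hvv) h
    | some v => exact ⟨v, rfl⟩
  have hmem : v ∈ items := PySem.List.min?_mem hv
  obtain ⟨k, hk⟩ : ∃ k, PySem.List.index? items v = some k := by
    cases hkk : PySem.List.index? items v with
    | none => exact absurd hmem ((PySem.List.index?_eq_none_iff _ _).mp hkk)
    | some k => exact ⟨k, rfl⟩
  obtain ⟨hlt, -, -⟩ := PySem.List.getElem_of_index?_eq_some hk
  simp only [PySem.List.index?_eq_idxOf?] at hk
  simp [hv, hk, hlt]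

-- while-loop of A as recursion on the shrinking list; items.pop(k) on an in-range
-- index is List.eraseIdx k, items.pop() is List.dropLast (exact: guards keep all
-- pops in range); items[m-1]/items[m+1] read with getD (exact: 0 < m < len-1 there).
def aLoop (largest : Int) (items : List Int) (count : Int) : Int :=
  if h : largest ∈ items then
    let minimum := (PySem.List.min? items (fun x => x)).getD 0
    let min_index := (PySem.List.index? items minimum).getD 0
    if min_index = 0 then
      if items.length = 1 then
        aLoop largest (items.dropLast) (count + 1)
      else
        aLoop largest ((items.eraseIdx 0).eraseIdx 0) (count + 1)
    else if min_index = items.length - 1 then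
      aLoop largest (items.dropLast.dropLast) (count + 1)
    else
      if items.getD (min_index - 1) 0 > items.getD (min_index + 1) 0 then
        aLoop largest ((items.eraseIdx (min_index - 1)).eraseIdx (min_index - 1)) (count + 1)
      else
        aLoop largest ((items.eraseIdx min_index).eraseIdx min_index) (count + 1)
  else count
termination_by items.length
decreasing_by
  all_goals
    (try simp only [List.length_dropLast, List.length_eraseIdx])
  · omega
  · have := List.length_pos_iff.mpr (List.ne_nil_of_mem h); split_ifs <;> omega
  · have := List.length_pos_iff.mpr (List.ne_nil_of_mem h)
    have := pv_min_index_lt items (List.ne_nil_of_mem h); omega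
  · have := pv_min_index_lt items (List.ne_nil_of_mem h); split_ifs <;> omega
  · have := pv_min_index_lt items (List.ne_nil_of_mem h); split_ifs <;> omega

def eliminate_neighbours (items : List Int) : Int :=
  let largest := (PySem.List.max? items (fun x => x)).getD 0   -- max(items); raises on [] → Pre_
  aLoop largest items 0

-- ===== PORT B =====
-- one pass over the positions sorted (stably) by value; alive = surviving original
-- positions in order; removed/remaining bookkeeping as in Source B; del alive[s:s+len]
-- is take/drop; list slices alive[a:b] on in-range bounds are (drop a).take (b-a).
def bLoop (items : List Int) (largest : Int) :
    List Nat → List Nat → List Bool → Int → Int → Int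
  | [], _, _, _, count => count
  | i :: rest, alive, removed, remaining, count =>
    if remaining = 0 then count
    else if removed.getD i false then
      bLoop items largest rest alive removed remaining count
    else
      let p := (PySem.List.index? alive i).getD 0
      let sv : Nat × List Nat :=
        if alive.length = 1 then (0, alive.take 1)
        else if p = 0 then (0, alive.take 2)
        else if p = alive.length - 1 then (p - 1, (alive.drop (p - 1)).take 2)
        else if items.getD (alive.getD (p - 1) 0) 0 > items.getD (alive.getD (p + 1) 0) 0 then
          (p - 1, (alive.drop (p - 1)).take 2)
        else (p, (alive.drop p).take 2)
      let removed' := sv.2.foldl (fun r v => r.set v true) removed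
      let remaining' := sv.2.foldl
        (fun rem v => if items.getD v 0 = largest then rem - 1 else rem) remaining
      let alive' := alive.take sv.1 ++ alive.drop (sv.1 + sv.2.length)
      bLoop items largest rest alive' removed' remaining' (count + 1)

def eliminate_neighbours_alt (items : List Int) : Int :=
  let largest := (PySem.List.max? items (fun x => x)).getD 0   -- max(items); raises on [] → Pre_
  let n := items.length
  let order := PySem.List.sorted (List.range n) (fun i => items.getD i 0)
  bLoop items largest order (List.range n) (List.replicate n false)
    ((PySem.List.count items largest : Int)) 0

-- ===== PRECONDITION & SPEC =====
-- Pre_ excludes only the empty list, on which A raises ValueError (max of empty).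
def Pre_eliminate_neighbours (items : List Int) : Prop := items ≠ []
instance (items : List Int) : Decidable (Pre_eliminate_neighbours items) := by
  unfold Pre_eliminate_neighbours; infer_instance
def pvWitness_eliminate_neighbours : List Int := [3, 1, 2]

def Spec_eliminate_neighbours (items : List Int) (out : Int) : Prop := out = eliminate_neighbours_alt items
instance (items : List Int) (out : Int) : Decidable (Spec_eliminate_neighbours items out) := by unfold Spec_eliminate_neighbours; infer_instance

-- ===== CLAIM (what is proved, stated in full; the proofs are below) =====
def Claim_equal_eliminate_neighbours : Prop := ∀ (items : List Int), Dom_eliminate_neighbours items → Pre_eliminate_neighbours items → Spec_eliminate_neighbours items (eliminate_neighbours items)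

-- ===== LEMMAS AND PROOFS =====

-- key of an original position
def pvKey (O : List Int) (i : Nat) : Int := O.getD i 0

-- strict lexicographic order on positions by (value, position)
def pvLex (key : Nat → Int) (a b : Nat) : Prop := key a < key b ∨ (key a = key b ∧ a < b)

theorem pv_insertBy_lex (key : Nat → Int) (x : Nat) :
    ∀ (acc : List Nat), acc.Pairwise (pvLex key) → (∀ y ∈ acc, y < x) →
    (PySem.List.insertBy (fun a b => decide (key a < key b)) x acc).Pairwise (pvLex key)
  | [], _, _ => by simp [PySem.List.insertBy]
  | y :: t, hp, hlt => by
    simp only [PySem.List.insertBy]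
    by_cases hxy : key x < key y
    · simp only [hxy, decide_true, if_true]
      refine List.pairwise_cons.mpr ⟨?_, hp⟩
      intro z hz
      rcases List.mem_cons.mp hz with rfl | hz
      · exact Or.inl hxy
      · rcases List.rel_of_pairwise_cons hp hz with h | ⟨he, _⟩
        · exact Or.inl (hxy.trans h)
        · exact Or.inl (he ▸ hxy)
    · simp only [hxy, decide_false]
      have hp' := List.pairwise_cons.mp hp
      refine List.pairwise_cons.mpr ⟨?_, ?_⟩
      · intro z hz
        rw [PySem.List.mem_insertBy] at hz
        rcases hz with rfl | hz
        · have hyx : y < z := hlt y (by simp)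
          rcases lt_trichotomy (key y) (key z) with h | h | h
          · exact Or.inl h
          · exact Or.inr ⟨h, hyx⟩
          · exact absurd h hxy
        · exact hp'.1 z hz
      · exact pv_insertBy_lex key x t hp'.2 (fun y hy => hlt y (by simp [hy]))

theorem pv_foldl_lex (key : Nat → Int) :
    ∀ (xs acc : List Nat), acc.Pairwise (pvLex key) → (∀ y ∈ acc, ∀ x ∈ xs, y < x) →
    xs.Pairwise (· < ·) →
    (xs.foldl (fun acc x => PySem.List.insertBy (fun a b => decide (key a < key b)) x acc) acc).Pairwise (pvLex key)
  | [], _, hp, _, _ => hp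
  | x :: rest, acc, hp, hord, hxs => by
    simp only [List.foldl_cons]
    apply pv_foldl_lex key rest
    · exact pv_insertBy_lex key x acc hp (fun y hy => hord y hy x (by simp))
    · intro y hy x' hx'
      rw [PySem.List.mem_insertBy] at hy
      rcases hy with rfl | hy
      · exact List.rel_of_pairwise_cons hxs hx'
      · exact hord y hy x' (by simp [hx'])
    · exact (List.pairwise_cons.mp hxs).2

-- the stable sort of the positions is strictly increasing in (value, position)
theorem pv_sorted_range_lex (O : List Int) :
    (PySem.List.sorted (List.range O.length) (pvKey O)).Pairwise (pvLex (pvKey O)) := by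
  rw [PySem.List.sorted_eq_foldl_insertBy]
  exact pv_foldl_lex _ _ [] (by simp) (by simp) (by simpa using List.pairwise_lt_range)

theorem pv_take_at {α : Type} (l1 l2 : List α) (k : Nat) (hk : k = l1.length) :
    (l1 ++ l2).take k = l1 := by subst hk; exact List.take_left ..
theorem pv_drop_at {α : Type} (l1 l2 : List α) (k : Nat) (hk : k = l1.length) :
    (l1 ++ l2).drop k = l2 := by subst hk; exact List.drop_left ..
theorem pv_getD_at {α : Type} (l1 : List α) (x : α) (l2 : List α) (d : α) (k : Nat) (hk : k = l1.length) :
    (l1 ++ x :: l2).getD k d = x := by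
  subst hk
  rw [List.getD_eq_getElem?_getD, List.getElem?_append_right (le_refl _)]
  simp

theorem pv_erase2 {α : Type} : ∀ (l : List α) (k : Nat),
    (l.eraseIdx k).eraseIdx k = l.take k ++ l.drop (k + 2)
  | [], k => by simp
  | x :: l, 0 => by cases l <;> simp [List.eraseIdx]
  | x :: l, k+1 => by
    simp only [List.eraseIdx_cons_succ, List.take_succ_cons, List.drop_succ_cons, List.cons_append]
    exact congrArg (x :: ·) (pv_erase2 l k)

theorem pv_dropLast2 {α : Type} (l : List α) (a b : α) :
    ((l ++ [a, b]).dropLast).dropLast = l := by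
  have : l ++ [a, b] = (l ++ [a]) ++ [b] := by simp
  rw [this, List.dropLast_concat, List.dropLast_concat]

theorem pv_foldl_sub (O : List Int) (M : Int) :
    ∀ (vict : List Nat) (r : Int),
    vict.foldl (fun rem v => if O.getD v 0 = M then rem - 1 else rem) r
      = r - ((vict.map (pvKey O)).count M : Int)
  | [], r => by simp
  | v :: vict, r => by
    rw [List.foldl_cons, pv_foldl_sub O M vict]
    simp only [List.map_cons, List.count_cons, pvKey, beq_iff_eq]
    split_ifs <;> push_cast <;> ring

theorem pv_foldl_set_length (removed : List Bool) :
    ∀ (vict : List Nat), (vict.foldl (fun r v => r.set v true) removed).length = removed.length := by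
  intro vict
  induction vict generalizing removed with
  | nil => rfl
  | cons v vict ih => simp [List.foldl_cons, ih]

theorem pv_foldl_set_getD (removed : List Bool) (vict : List Nat) (j : Nat)
    (hb : ∀ v ∈ vict, v < removed.length) :
    (vict.foldl (fun r v => r.set v true) removed).getD j false
      = if j ∈ vict then true else removed.getD j false := by
  induction vict generalizing removed with
  | nil => simp
  | cons v vict ih =>
    simp only [List.foldl_cons]
    rw [ih _ (by intro w hw; simpa using hb w (by simp [hw]))]
    by_cases hj : j ∈ vict
    · simp [hj]
    · have hv := hb v (by simp)
      by_cases hjv : j = v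
      · subst hjv
        simp [hj, List.getD_eq_getElem?_getD, List.getElem?_set_self (by omega), hv]
      · rw [List.getD_eq_getElem?_getD, List.getD_eq_getElem?_getD,
          List.getElem?_set_ne (Ne.symm hjv)]
        simp [hj, hjv]



theorem pv_step (O : List Int) (M : Int) (rest done A1 vict A2 : List Nat)
    (i : Nat) (removed : List Bool) (count : Int)
    (IH : ∀ (done alive : List Nat) (removed : List Bool) (count : Int),
        PySem.List.sorted (List.range O.length) (pvKey O) = done ++ rest →
        (∀ j ∈ done, j ∉ alive) →
        alive.Pairwise (· < ·) →
        (∀ a ∈ alive, a < O.length) →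
        removed.length = O.length →
        (∀ j, j < O.length → ((removed.getD j false) = true ↔ j ∉ alive)) →
        aLoop M (alive.map (pvKey O)) count
          = bLoop O M rest alive removed ((List.count M (alive.map (pvKey O)) : Nat) : Int) count)
    (hsorted : PySem.List.sorted (List.range O.length) (pvKey O) = (done ++ [i]) ++ rest)
    (hdone : ∀ j ∈ done, j ∉ A1 ++ vict ++ A2)
    (hi : i ∈ vict)
    (hpair : (A1 ++ vict ++ A2).Pairwise (· < ·))
    (hbound : ∀ a ∈ A1 ++ vict ++ A2, a < O.length)
    (hlen : removed.length = O.length)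
    (hrm : ∀ j, j < O.length → ((removed.getD j false) = true ↔ j ∉ A1 ++ vict ++ A2)) :
    aLoop M ((A1 ++ A2).map (pvKey O)) count
      = bLoop O M rest (A1 ++ A2)
          (vict.foldl (fun r v => r.set v true) removed)
          (vict.foldl (fun rem v => if O.getD v 0 = M then rem - 1 else rem)
            ((List.count M ((A1 ++ vict ++ A2).map (pvKey O)) : Nat) : Int)) count := by
  have hmem : ∀ a, a ∈ A1 ++ vict ++ A2 ↔ a ∈ A1 ∨ a ∈ vict ∨ a ∈ A2 := by
    simp [List.mem_append, or_assoc]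
  have hmem2 : ∀ a, a ∈ A1 ++ A2 ↔ a ∈ A1 ∨ a ∈ A2 := by simp
  have hnd' : (A1 ++ (vict ++ A2)).Nodup := by
    rw [← List.append_assoc]; exact hpair.imp (fun h => Nat.ne_of_lt h)
  have hpair' : (A1 ++ (vict ++ A2)).Pairwise (· < ·) := by rwa [← List.append_assoc]
  have hndA1 : ∀ v ∈ vict, v ∉ A1 := by
    intro v hv hvA1
    exact (List.disjoint_of_nodup_append hnd') hvA1 (List.mem_append.mpr (Or.inl hv))
  have hndA2 : ∀ v ∈ vict, v ∉ A2 := by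
    have h2 : (vict ++ A2).Nodup := (List.nodup_append.mp hnd').2.1
    intro v hv
    exact (List.disjoint_of_nodup_append h2) hv
  have hvb : ∀ v ∈ vict, v < removed.length := by
    intro v hv; rw [hlen]; exact hbound v ((hmem v).mpr (Or.inr (Or.inl hv)))
  have hsub : (A1 ++ A2).Sublist (A1 ++ (vict ++ A2)) :=
    List.Sublist.append_left (List.sublist_append_right _ _) A1
  rw [pv_foldl_sub]
  have hcnt : ((List.count M ((A1 ++ vict ++ A2).map (pvKey O)) : Nat) : Int)
      - ((vict.map (pvKey O)).count M : Int)
      = ((List.count M ((A1 ++ A2).map (pvKey O)) : Nat) : Int) := by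
    simp only [List.map_append, List.count_append]
    push_cast; ring
  rw [hcnt]
  apply IH (done ++ [i]) (A1 ++ A2) _ count
  · rw [hsorted]
  · intro j hj
    rcases List.mem_append.mp hj with hj | hj
    · have := hdone j hj; rw [hmem] at this; push Not at this
      rw [hmem2]; push Not
      exact ⟨this.1, this.2.2⟩
    · have hji : j = i := by simpa using hj
      subst hji
      rw [hmem2]; push Not
      exact ⟨hndA1 j hi, hndA2 j hi⟩
  · exact (hpair'.sublist hsub)
  · intro a ha
    have ha2 : a ∈ A1 ++ (vict ++ A2) := hsub.subset ha
    rw [← List.append_assoc] at ha2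
    exact hbound a ha2
  · rw [pv_foldl_set_length, hlen]
  · intro j hj
    rw [pv_foldl_set_getD removed vict j hvb]
    by_cases hjv : j ∈ vict
    · simp only [hjv, if_true, true_iff]
      rw [hmem2]; push Not
      exact ⟨hndA1 j hjv, hndA2 j hjv⟩
    · simp only [hjv, if_false]
      rw [hrm j hj, hmem, hmem2]
      tauto

set_option maxHeartbeats 1000000

theorem pv_loop_eq (O : List Int) (M : Int) :
    ∀ (ord done alive : List Nat) (removed : List Bool) (count : Int),
    PySem.List.sorted (List.range O.length) (pvKey O) = done ++ ord →
    (∀ j ∈ done, j ∉ alive) →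
    alive.Pairwise (· < ·) →
    (∀ a ∈ alive, a < O.length) →
    removed.length = O.length →
    (∀ j, j < O.length → ((removed.getD j false) = true ↔ j ∉ alive)) →
    aLoop M (alive.map (pvKey O)) count
      = bLoop O M ord alive removed ((List.count M (alive.map (pvKey O)) : Nat) : Int) count := by
  intro ord
  induction ord with
  | nil =>
    intro done alive removed count hsorted hdone hpair hbound hlen hrm
    have halive : alive = [] := by
      rw [List.eq_nil_iff_forall_not_mem]
      intro a ha
      have han : a ∈ List.range O.length := List.mem_range.mpr (hbound a ha)
      have hs : a ∈ PySem.List.sorted (List.range O.length) (pvKey O) :=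
        (PySem.List.mem_sorted _ _ _ _).mpr han
      rw [hsorted, List.append_nil] at hs
      exact hdone a hs ha
    subst halive
    rw [aLoop]
    simp [bLoop]
  | cons i rest IH =>
    intro done alive removed count hsorted hdone hpair hbound hlen hrm
    rw [bLoop]
    by_cases hz : ((List.count M (alive.map (pvKey O)) : Nat) : Int) = 0
    · rw [if_pos hz]
      have hnm : M ∉ alive.map (pvKey O) := by
        rw [← List.count_eq_zero]
        omega
      rw [aLoop, dif_neg hnm]
    · rw [if_neg hz]
      have hM : M ∈ alive.map (pvKey O) := by
        rw [← List.count_pos_iff]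
        omega
      have hin : i < O.length := by
        have hs : i ∈ PySem.List.sorted (List.range O.length) (pvKey O) := by
          rw [hsorted]; simp
        exact List.mem_range.mp ((PySem.List.mem_sorted _ _ _ _).mp hs)
      by_cases hrem : removed.getD i false = true
      · rw [hrem, if_pos rfl]
        exact IH (done ++ [i]) alive removed count
          (by rw [hsorted]; simp)
          (by intro j hj
              rcases List.mem_append.mp hj with hj | hj
              · exact hdone j hj
              · have : j = i := by simpa using hj
                subst this; exact (hrm j hin).mp hrem)
          hpair hbound hlen hrm
      · have hi : i ∈ alive := by
          by_contra h; exact hrem ((hrm i hin).mpr h)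
        rw [Bool.eq_false_iff.mpr hrem, if_neg (by simp)]
        obtain ⟨apre, asuf, hal⟩ := List.append_of_mem hi
        subst hal
        have hlex : ∀ a ∈ apre ++ i :: asuf, a ≠ i → pvLex (pvKey O) i a := by
          intro a ha hne
          have han : a ∈ List.range O.length := List.mem_range.mpr (hbound a ha)
          have hs : a ∈ PySem.List.sorted (List.range O.length) (pvKey O) :=
            (PySem.List.mem_sorted _ _ _ _).mpr han
          rw [hsorted] at hs
          rcases List.mem_append.mp hs with h | h
          · exact absurd ha (hdone a h)
          · have hrest : a ∈ rest := by
              rcases List.mem_cons.mp h with h2 | h2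
              · exact absurd h2 hne
              · exact h2
            have hplex := pv_sorted_range_lex O
            rw [hsorted] at hplex
            exact List.rel_of_pairwise_cons (List.pairwise_append.mp hplex).2.1 hrest
        have happre : ∀ a ∈ apre, a < i := by
          intro a ha
          exact (List.pairwise_append.mp hpair).2.2 a ha i (by simp)
        have hkapre : ∀ a ∈ apre, pvKey O i < pvKey O a := by
          intro a ha
          have h1 := happre a ha
          rcases hlex a (by simp [ha]) (by omega) with h | ⟨_, h⟩
          · exact h
          · omega
        have hkmin : ∀ a ∈ apre ++ i :: asuf, pvKey O i ≤ pvKey O a := by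
          intro a ha
          by_cases hne : a = i
          · subst hne; rfl
          · rcases hlex a ha hne with h | ⟨h, _⟩
            · exact le_of_lt h
            · exact le_of_eq h
        have hminL : PySem.List.min? ((apre ++ i :: asuf).map (pvKey O)) (fun x => x)
            = some (pvKey O i) := by
          obtain ⟨m, hm⟩ : ∃ m, PySem.List.min? ((apre ++ i :: asuf).map (pvKey O)) (fun x => x) = some m := by
            cases hmm : PySem.List.min? ((apre ++ i :: asuf).map (pvKey O)) (fun x => x) with
            | none =>
              have := (PySem.List.min?_eq_none_iff _ _).mp hmm
              simp at this
            | some m => exact ⟨m, rfl⟩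
          have hmem : m ∈ (apre ++ i :: asuf).map (pvKey O) := PySem.List.min?_mem hm
          obtain ⟨a, ha, rfl⟩ := List.mem_map.mp hmem
          have h1 : pvKey O i ≤ pvKey O a := hkmin a ha
          have h2 : pvKey O a ≤ pvKey O i :=
            PySem.List.min?_isMin hm _ (List.mem_map.mpr ⟨i, by simp, rfl⟩)
          rw [hm]
          exact congrArg some (le_antisymm h2 h1)
        have hidxL : PySem.List.index? ((apre ++ i :: asuf).map (pvKey O)) (pvKey O i)
            = some apre.length := by
          rw [PySem.List.index?_eq_some_iff]
          refine ⟨apre.map (pvKey O), asuf.map (pvKey O), by simp, by simp, ?_⟩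
          intro hmem
          obtain ⟨a, ha, he⟩ := List.mem_map.mp hmem
          exact absurd he (ne_of_gt (hkapre a ha))
        have hidxB : PySem.List.index? (apre ++ i :: asuf) i = some apre.length := by
          rw [PySem.List.index?_eq_some_iff]
          refine ⟨apre, asuf, rfl, rfl, ?_⟩
          intro hmem
          exact absurd rfl (ne_of_lt (happre i hmem))
        rw [aLoop, dif_pos hM]
        simp only [hminL, Option.getD_some, hidxL, hidxB]
        rcases List.eq_nil_or_concat apre with rfl | ⟨apre0, a0, rfl⟩
        · cases asuf with
          | nil =>
            have step := pv_step O M rest done [] [i] [] i removed (count + 1) IH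
              (by rw [hsorted]; simp) (by simpa using hdone) (by simp)
              (by simpa using hpair) (by simpa using hbound) hlen (by simpa using hrm)
            simpa using step
          | cons a1 asuf' =>
            have step := pv_step O M rest done [] [i, a1] asuf' i removed (count + 1) IH
              (by rw [hsorted]; simp) (by simpa using hdone) (by simp)
              (by simpa using hpair) (by simpa using hbound) hlen (by simpa using hrm)
            simpa using step
        · cases asuf with
          | nil =>
            simp only [List.concat_eq_append] at *
            have hx1 : (apre0 ++ [a0]).length - 1 = apre0.length := by
              simp only [List.length_append, List.length_cons, List.length_nil]; omega
            have c1 : ¬((apre0 ++ [a0]) ++ i :: ([] : List Nat)).length = 1 := by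
              simp only [List.length_append, List.length_cons, List.length_nil]; omega
            have c2 : ¬(apre0 ++ [a0]).length = 0 := by
              simp only [List.length_append, List.length_cons, List.length_nil]; omega
            have c3A : (apre0 ++ [a0]).length
                = (List.map (pvKey O) ((apre0 ++ [a0]) ++ i :: [])).length - 1 := by
              simp only [List.length_map, List.length_append, List.length_cons, List.length_nil]
              omega
            have c3B : (apre0 ++ [a0]).length = ((apre0 ++ [a0]) ++ i :: ([] : List Nat)).length - 1 := by
              simp only [List.length_append, List.length_cons, List.length_nil]; omega
            simp only [if_neg c1, if_neg c2, if_pos c3A, if_pos c3B, hx1]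
            have gA : (List.map (pvKey O) apre0 ++ [pvKey O a0, pvKey O i]).dropLast.dropLast
                = List.map (pvKey O) apre0 := pv_dropLast2 _ _ _
            have gB1 : List.take 2 (List.drop apre0.length (apre0 ++ [a0, i])) = [a0, i] := by
              rw [pv_drop_at _ _ _ rfl]; rfl
            have gB3 : List.take apre0.length (apre0 ++ [a0, i]) = apre0 := pv_take_at _ _ _ rfl
            have gB4 : List.drop (apre0.length + 2) (apre0 ++ [a0, i]) = [] := by
              apply List.drop_eq_nil_of_le; simp
            have step := pv_step O M rest done apre0 [a0, i] [] i removed (count + 1) IH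
              (by rw [hsorted]; simp) (by simpa using hdone) (by simp)
              (by simpa using hpair) (by simpa using hbound) hlen (by simpa using hrm)
            simpa [gA, gB1, gB3, gB4] using step
          | cons a1 asuf' =>
            simp only [List.concat_eq_append] at *
            have hx1 : (apre0 ++ [a0]).length - 1 = apre0.length := by
              simp only [List.length_append, List.length_cons, List.length_nil]; omega
            have c1 : ¬((apre0 ++ [a0]) ++ i :: a1 :: asuf').length = 1 := by
              simp only [List.length_append, List.length_cons, List.length_nil]; omega
            have c2 : ¬(apre0 ++ [a0]).length = 0 := by
              simp only [List.length_append, List.length_cons, List.length_nil]; omega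
            have c3A : ¬(apre0 ++ [a0]).length
                = (List.map (pvKey O) ((apre0 ++ [a0]) ++ i :: a1 :: asuf')).length - 1 := by
              simp only [List.length_map, List.length_append, List.length_cons, List.length_nil]
              omega
            have c3B : ¬(apre0 ++ [a0]).length = ((apre0 ++ [a0]) ++ i :: a1 :: asuf').length - 1 := by
              simp only [List.length_append, List.length_cons, List.length_nil]; omega
            simp only [if_neg c1, if_neg c2, if_neg c3A, if_neg c3B, hx1]
            have e1 : (List.map (pvKey O) ((apre0 ++ [a0]) ++ i :: a1 :: asuf')).getD apre0.length 0
                = O.getD a0 0 := by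
              rw [show List.map (pvKey O) ((apre0 ++ [a0]) ++ i :: a1 :: asuf')
                  = List.map (pvKey O) apre0
                    ++ pvKey O a0 :: pvKey O i :: pvKey O a1 :: List.map (pvKey O) asuf' by simp]
              exact pv_getD_at _ _ _ _ _ (by simp)
            have e2 : (List.map (pvKey O) ((apre0 ++ [a0]) ++ i :: a1 :: asuf')).getD
                  ((apre0 ++ [a0]).length + 1) 0 = O.getD a1 0 := by
              rw [show List.map (pvKey O) ((apre0 ++ [a0]) ++ i :: a1 :: asuf')
                  = (List.map (pvKey O) apre0 ++ [pvKey O a0, pvKey O i])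
                    ++ pvKey O a1 :: List.map (pvKey O) asuf' by simp]
              exact pv_getD_at _ _ _ _ _ (by simp)
            have f1 : ((apre0 ++ [a0]) ++ i :: a1 :: asuf').getD apre0.length 0 = a0 := by
              rw [show (apre0 ++ [a0]) ++ i :: a1 :: asuf' = apre0 ++ a0 :: i :: a1 :: asuf' by simp]
              exact pv_getD_at _ _ _ _ _ rfl
            have f2 : ((apre0 ++ [a0]) ++ i :: a1 :: asuf').getD ((apre0 ++ [a0]).length + 1) 0
                = a1 := by
              rw [show (apre0 ++ [a0]) ++ i :: a1 :: asuf' = (apre0 ++ [a0, i]) ++ a1 :: asuf' by simp]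
              exact pv_getD_at _ _ _ _ _ (by simp)
            simp only [e1, e2, f1, f2]
            by_cases hc : O.getD a0 0 > O.getD a1 0
            · simp only [if_pos hc]
              have gA : ((List.map (pvKey O) apre0
                      ++ pvKey O a0 :: pvKey O i :: pvKey O a1 :: List.map (pvKey O) asuf').eraseIdx
                    apre0.length).eraseIdx apre0.length
                  = List.map (pvKey O) apre0 ++ pvKey O a1 :: List.map (pvKey O) asuf' := by
                rw [pv_erase2]
                rw [show List.map (pvKey O) apre0
                      ++ pvKey O a0 :: pvKey O i :: pvKey O a1 :: List.map (pvKey O) asuf'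
                    = (List.map (pvKey O) apre0 ++ [pvKey O a0, pvKey O i])
                      ++ pvKey O a1 :: List.map (pvKey O) asuf' by simp]
                rw [pv_drop_at _ _ _ (by simp), List.append_assoc, pv_take_at _ _ _ (by simp)]
              have gBd : List.drop apre0.length (apre0 ++ a0 :: i :: a1 :: asuf')
                  = a0 :: i :: a1 :: asuf' := pv_drop_at _ _ _ rfl
              have gBt : List.take apre0.length (apre0 ++ a0 :: i :: a1 :: asuf') = apre0 :=
                pv_take_at _ _ _ rfl
              have gB4 : List.drop (apre0.length + 2) (apre0 ++ a0 :: i :: a1 :: asuf')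
                  = a1 :: asuf' := by
                rw [show apre0 ++ a0 :: i :: a1 :: asuf' = (apre0 ++ [a0, i]) ++ a1 :: asuf' by simp]
                exact pv_drop_at _ _ _ (by simp)
              have step := pv_step O M rest done apre0 [a0, i] (a1 :: asuf') i removed (count + 1) IH
                (by rw [hsorted]; simp) (by simpa using hdone) (by simp)
                (by simpa using hpair) (by simpa using hbound) hlen (by simpa using hrm)
              simpa [gA, gBd, gBt, gB4] using step
            · simp only [if_neg hc]
              have gA : ((List.map (pvKey O) apre0
                      ++ pvKey O a0 :: pvKey O i :: pvKey O a1 :: List.map (pvKey O) asuf').eraseIdx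
                    (apre0.length + 1)).eraseIdx (apre0.length + 1)
                  = List.map (pvKey O) apre0 ++ pvKey O a0 :: List.map (pvKey O) asuf' := by
                rw [pv_erase2]
                rw [show List.map (pvKey O) apre0
                      ++ pvKey O a0 :: pvKey O i :: pvKey O a1 :: List.map (pvKey O) asuf'
                    = (List.map (pvKey O) apre0 ++ [pvKey O a0, pvKey O i, pvKey O a1])
                      ++ List.map (pvKey O) asuf' by simp]
                rw [pv_drop_at _ _ _ (by simp)]
                rw [show (List.map (pvKey O) apre0 ++ [pvKey O a0, pvKey O i, pvKey O a1])
                      ++ List.map (pvKey O) asuf'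
                    = (List.map (pvKey O) apre0 ++ [pvKey O a0])
                      ++ ([pvKey O i, pvKey O a1] ++ List.map (pvKey O) asuf') by simp]
                rw [pv_take_at _ _ _ (by simp)]
                simp
              have gBd : List.drop (apre0.length + 1) (apre0 ++ a0 :: i :: a1 :: asuf')
                  = i :: a1 :: asuf' := by
                rw [show apre0 ++ a0 :: i :: a1 :: asuf' = (apre0 ++ [a0]) ++ i :: a1 :: asuf' by simp]
                exact pv_drop_at _ _ _ (by simp)
              have gBt : List.take (apre0.length + 1) (apre0 ++ a0 :: i :: a1 :: asuf')
                  = apre0 ++ [a0] := by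
                rw [show apre0 ++ a0 :: i :: a1 :: asuf' = (apre0 ++ [a0]) ++ i :: a1 :: asuf' by simp]
                exact pv_take_at _ _ _ (by simp)
              have gB4 : List.drop (apre0.length + 3) (apre0 ++ a0 :: i :: a1 :: asuf')
                  = asuf' := by
                rw [show apre0 ++ a0 :: i :: a1 :: asuf' = (apre0 ++ [a0, i, a1]) ++ asuf' by simp]
                exact pv_drop_at _ _ _ (by simp)
              have step := pv_step O M rest done (apre0 ++ [a0]) [i, a1] asuf' i removed (count + 1) IH
                (by rw [hsorted]; simp) (by simpa using hdone) (by simp)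
                (by simpa using hpair) (by simpa using hbound) hlen (by simpa using hrm)
              simpa [gA, gBd, gBt, gB4] using step

theorem pv_map_range (O : List Int) : (List.range O.length).map (pvKey O) = O := by
  apply List.ext_getElem (by simp)
  intro i h1 h2
  simp [pvKey, List.getD_eq_getElem?_getD, List.getElem?_eq_getElem h2]

theorem pv_top (items : List Int) :
    eliminate_neighbours items = eliminate_neighbours_alt items := by
  simp only [eliminate_neighbours, eliminate_neighbours_alt]
  rw [PySem.List.count_eq]
  have h := pv_loop_eq items ((PySem.List.max? items (fun x => x)).getD 0)
    (PySem.List.sorted (List.range items.length) (pvKey items)) []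
    (List.range items.length) (List.replicate items.length false) 0
    (List.nil_append _).symm
    (by simp)
    List.pairwise_lt_range
    (by intro a ha; exact List.mem_range.mp ha)
    (by simp)
    (by intro j hj
        simp only [List.getD_eq_getElem?_getD, List.getElem?_replicate]
        constructor
        · intro hfalse
          split at hfalse <;> simp_all
        · intro hmem
          exact absurd (List.mem_range.mpr hj) hmem)
  rw [pv_map_range] at h
  exact h

-- ===== VERDICT (by name: the statement is the Claim_ definition above) =====
theorem eliminate_neighbours_spec : Claim_equal_eliminate_neighbours := by
  intro items hdom hpre
  exact pv_top items
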